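-- pv_equiv track=rewrite | github.com/Charles-Gahide/programing-1 | 08-lists/12-assignment-make-teams/student.py | make_teams
-- ===== SOURCE A (Python) =====
-- def make_teams(participants, team_size):
--     # If team_size is invalid or larger than participants, just one team
--     if team_size <= 0 or team_size >= len(participants):
--         return [participants[:]]
--
--     teams = []
--     n = len(participants)
--     index = 0
--
--     # Create base teams
--     while index + team_size <= n:
--         teams.append(participants[index:index+team_size])
--         index += team_size
--
--     # Distribute leftovers across existing teams
--     leftover = participants[index:]
--     for i, person in enumerate(leftover):
--         teams[i % len(teams)].append(person)
--
--     return teams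
-- ===== SOURCE B (Python) =====
-- def make_teams(participants, team_size):
--     n = len(participants)
--     # Invalid or oversized team_size: everyone in one team (copy)
--     if team_size <= 0 or team_size >= n:
--         return [participants[:]]
--     num_teams = n // team_size
--     cut = num_teams * team_size
--     teams = [[] for _ in range(num_teams)]
--     # single pass: route each person directly to its destination team
--     for p, person in enumerate(participants):
--         t = p // team_size if p < cut else (p - cut) % num_teams
--         teams[t].append(person)
--     return teams
-- ===== Notes on version B (the rewrite author's own statement) =====
-- stated objective: alternative
-- what changed: A builds teams by slicing chunks in a while-loop and then mutates them in a second round-robin pass over the leftovers; B never slices: it pre-allocates num_teams empty buckets and makes one pass over all participants, computing each person's destination team index arithmetically (p // team_size for base members, (p - cut) % num_teams for leftovers) and appending directly.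
import Mathlib
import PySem

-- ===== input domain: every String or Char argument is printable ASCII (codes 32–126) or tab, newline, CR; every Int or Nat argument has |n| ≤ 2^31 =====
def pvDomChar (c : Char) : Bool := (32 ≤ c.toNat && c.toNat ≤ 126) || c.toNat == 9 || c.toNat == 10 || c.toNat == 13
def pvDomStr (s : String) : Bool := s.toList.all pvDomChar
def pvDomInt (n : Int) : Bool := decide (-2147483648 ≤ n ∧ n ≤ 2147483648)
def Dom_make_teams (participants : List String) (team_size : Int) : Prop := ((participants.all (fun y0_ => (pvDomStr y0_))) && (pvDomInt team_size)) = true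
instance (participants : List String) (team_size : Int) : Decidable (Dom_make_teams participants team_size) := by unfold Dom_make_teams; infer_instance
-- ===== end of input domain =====

-- B replaces A's two phases (slice-chunking while-loop, then a mutating round-robin pass over the
-- leftovers) by a single pass routing every participant directly to a computed bucket index; objective: alternative.


-- ===== PORT A =====
-- the 'while index + team_size <= n' loop; fuel only makes it total (≥ participants.length+1 iterations never happen)
def makeTeamsLoop (participants : List String) (team_size n : Int) :
    Nat → Int → List (List String) → Int × List (List String)
  | 0, index, teams => (index, teams)
  | fuel + 1, index, teams =>
    if index + team_size ≤ n then
      makeTeamsLoop participants team_size n fuel (index + team_size)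
        (teams ++ [PySem.List.slice participants (some index) (some (index + team_size))])
    else (index, teams)

-- 'teams[i % len(teams)].append(person)' over enumerate(leftover)
def distLoop (teams : List (List String)) (pairs : List (Int × String)) : List (List String) :=
  pairs.foldl
    (fun ts p =>
      ts.set (p.1 % (ts.length : Int)).toNat ((ts.getD (p.1 % (ts.length : Int)).toNat []) ++ [p.2]))
    teams

def make_teams (participants : List String) (team_size : Int) : List (List String) :=
  if team_size ≤ 0 ∨ team_size ≥ (participants.length : Int) then
    [PySem.List.slice participants none none]
  else
    let n : Int := participants.length
    let r := makeTeamsLoop participants team_size n (participants.length + 1) 0 []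
    let leftover := PySem.List.slice participants (some r.1) none
    distLoop r.2 (PySem.List.enumerate leftover 0)

-- ===== PORT B =====
-- 't = p // team_size if p < cut else (p - cut) % num_teams; teams[t].append(person)'
def routeStep (cut team_size num_teams : Int) (ts : List (List String)) (pp : Int × String) :
    List (List String) :=
  let t : Int :=
    if pp.1 < cut then PySem.Int.floordiv pp.1 team_size
    else PySem.Int.mod (pp.1 - cut) num_teams
  ts.set t.toNat (ts.getD t.toNat [] ++ [pp.2])

def make_teams_alt (participants : List String) (team_size : Int) : List (List String) :=
  let n : Int := participants.length
  if team_size ≤ 0 ∨ team_size ≥ n then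
    [PySem.List.slice participants none none]
  else
    let num_teams : Int := PySem.Int.floordiv n team_size
    let cut : Int := num_teams * team_size
    (PySem.List.enumerate participants 0).foldl
      (routeStep cut team_size num_teams)
      (List.replicate num_teams.toNat [])

-- ===== PRECONDITION & SPEC =====
def Spec_make_teams (participants : List String) (team_size : Int) (out : List (List String)) : Prop := out = make_teams_alt participants team_size
instance (participants : List String) (team_size : Int) (out : List (List String)) : Decidable (Spec_make_teams participants team_size out) := by unfold Spec_make_teams; infer_instance

-- ===== CLAIM (what is proved, stated in full; the proofs are below) =====
def Claim_equal_make_teams : Prop := ∀ (participants : List String) (team_size : Int), Dom_make_teams participants team_size → Spec_make_teams participants team_size (make_teams participants team_size)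

-- ===== LEMMAS AND PROOFS =====

-- chunks produced by A's while loop
theorem loop_spec (p : List String) (ts n : Int) (hts : 1 ≤ ts) :
    ∀ (q fuel : Nat) (index : Int) (teams : List (List String)),
      0 ≤ index → q = (n - index).toNat / ts.toNat → q ≤ fuel →
      makeTeamsLoop p ts n fuel index teams =
        (index + ts * q,
         teams ++ (List.range q).map
           (fun i : Nat => PySem.List.slice p (some (index + (i : Int) * ts)) (some (index + ((i : Int) + 1) * ts)))) := by
  intro q
  induction q with
  | zero =>
    intro fuel index teams hidx hq hf
    have hlt : ¬ (index + ts ≤ n) := by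
      intro h
      have h1 : ts.toNat ≤ (n - index).toNat := by omega
      have h2 : 1 ≤ (n - index).toNat / ts.toNat :=
        (Nat.one_le_div_iff (by omega)).mpr h1
      omega
    cases fuel with
    | zero => simp [makeTeamsLoop]
    | succ f => simp [makeTeamsLoop, hlt]
  | succ q ih =>
    intro fuel index teams hidx hq hf
    have ht : 0 < ts.toNat := by omega
    have hcond : index + ts ≤ n := by
      by_contra h
      have hlt : (n - index).toNat < ts.toNat := by omega
      have := Nat.div_eq_of_lt hlt
      omega
    obtain ⟨f, rfl⟩ : ∃ f, fuel = f + 1 := ⟨fuel - 1, by omega⟩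
    have hta : ts.toNat ≤ (n - index).toNat := by omega
    have hq' : q = (n - (index + ts)).toNat / ts.toNat := by
      have ha : (n - (index + ts)).toNat = (n - index).toNat - ts.toNat := by omega
      rw [ha]
      have hd := Nat.div_eq ((n - index).toNat) ts.toNat
      rw [if_pos ⟨ht, hta⟩] at hd
      omega
    rw [makeTeamsLoop, if_pos hcond,
      ih f (index + ts) (teams ++ [PySem.List.slice p (some index) (some (index + ts))])
        (by omega) hq' (by omega)]
    refine Prod.ext ?_ ?_
    · show index + ts + ts * (q : Int) = index + ts * ((q : Nat) + 1 : Nat)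
      push_cast
      ring
    · show (teams ++ [PySem.List.slice p (some index) (some (index + ts))]) ++
        (List.range q).map (fun i : Nat =>
          PySem.List.slice p (some (index + ts + (i : Int) * ts)) (some (index + ts + ((i : Int) + 1) * ts))) =
        teams ++ (List.range (q + 1)).map (fun i : Nat =>
          PySem.List.slice p (some (index + (i : Int) * ts)) (some (index + ((i : Int) + 1) * ts)))
      rw [List.range_succ_eq_map, List.map_cons, List.map_map, List.append_assoc,
        List.singleton_append]
      have hmap : (List.range q).map (fun i : Nat =>
            PySem.List.slice p (some (index + ts + (i : Int) * ts)) (some (index + ts + ((i : Int) + 1) * ts)))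
          = (List.range q).map ((fun i : Nat =>
            PySem.List.slice p (some (index + (i : Int) * ts)) (some (index + ((i : Int) + 1) * ts))) ∘ Nat.succ) := by
        apply List.map_congr_left
        intro a _
        simp only [Function.comp_apply]
        push_cast
        have e1 : index + ts + (a : Int) * ts = index + ((a : Int) + 1) * ts := by ring
        have e2 : index + ts + ((a : Int) + 1) * ts = index + ((a : Int) + 1 + 1) * ts := by ring
        rw [e1, e2]
      rw [hmap]
      congr 2
      norm_num

theorem map_getD_range (T : List (List String)) :
    (List.range T.length).map (fun j => T[j]?.getD []) = T := by
  apply List.ext_getElem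
  · simp
  · intro i h1 h2
    simp [List.getElem?_eq_getElem h2]

theorem getD_map_range' (f : Nat → List String) (m j : Nat) (hj : j < m) :
    ((List.range m).map f).getD j [] = f j := by
  rw [List.getD_eq_getElem?_getD]
  simp [hj]

-- A's second pass characterised: team j collects the leftovers with index ≡ j (mod #teams)
theorem dist_spec :
    ∀ (L : List String) (c : Int) (T : List (List String)),
      0 < T.length → 0 ≤ c →
      distLoop T (PySem.List.enumerate L c) =
        (List.range T.length).map (fun j : Nat =>
          T.getD j [] ++
          ((PySem.List.enumerate L c).filter
            (fun jp => jp.1 % (T.length : Int) == (j : Int))).map (·.2)) := by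
  intro L
  induction L with
  | nil =>
    intro c T hT hc
    rw [PySem.List.enumerate_nil]
    simp only [distLoop, List.foldl_nil, List.filter_nil, List.map_nil, List.append_nil]
    conv_lhs => rw [← map_getD_range T]
    apply List.map_congr_left
    intro j _
    rw [List.getD_eq_getElem?_getD]
  | cons x L ih =>
    intro c T hT hc
    rw [PySem.List.enumerate_cons]
    set m : Nat := T.length with hm
    set r : Nat := (c % (m : Int)).toNat with hr
    have hmne : (m : Int) ≠ 0 := by exact_mod_cast hT.ne'
    have hmod0 : 0 ≤ c % (m : Int) := Int.emod_nonneg c hmne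
    have hmodlt : c % (m : Int) < (m : Int) := Int.emod_lt_of_pos c (by exact_mod_cast hT)
    have hrm : r < m := by omega
    have hcm : c % (m : Int) = (r : Int) := by omega
    set T' : List (List String) := T.set r (T.getD r [] ++ [x]) with hT'
    have hlen : T'.length = m := by simp [hT', hm]
    have step : distLoop T ((c, x) :: PySem.List.enumerate L (c + 1)) =
        distLoop T' (PySem.List.enumerate L (c + 1)) := by
      simp only [distLoop, List.foldl_cons]
      rw [← hm, ← hr, ← hT']
    rw [step, ih (c + 1) T' (by omega) (by omega), hlen]
    apply List.map_congr_left
    intro j hj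
    have hjm : j < m := List.mem_range.mp hj
    have hbeq : ((c % (m : Int)) == (j : Int)) = decide (r = j) := by
      rw [hcm]
      by_cases h : r = j <;> simp [h]
    rw [List.filter_cons]
    simp only [hbeq]
    by_cases h : r = j
    · subst h
      have hgetD : T'.getD r [] = T.getD r [] ++ [x] := by
        rw [List.getD_eq_getElem?_getD, hT']
        rw [List.getElem?_set_self (by omega)]
        simp [List.getD_eq_getElem?_getD]
      simp only [decide_true, if_true, List.map_cons, hgetD]
      rw [List.append_assoc, List.singleton_append]
    · have hgetD : T'.getD j [] = T.getD j [] := by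
        rw [List.getD_eq_getElem?_getD, hT', List.getElem?_set_ne h]
        rw [List.getD_eq_getElem?_getD]
      simp only [h, decide_false, hgetD]
      simp

-- B's single pass characterised: folding 'append at index f i' fills bucket j with the f-preimage of j
theorem fold_assign (f : Int → Nat) :
    ∀ (pairs : List (Int × String)) (T : List (List String)),
      (∀ q ∈ pairs, f q.1 < T.length) →
      pairs.foldl (fun ts q => ts.set (f q.1) (ts.getD (f q.1) [] ++ [q.2])) T =
        (List.range T.length).map (fun j =>
          T.getD j [] ++ ((pairs.filter (fun q => f q.1 == j)).map (·.2))) := by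
  intro pairs
  induction pairs with
  | nil =>
    intro T _
    simp only [List.foldl_nil, List.filter_nil, List.map_nil, List.append_nil]
    conv_lhs => rw [← map_getD_range T]
    apply List.map_congr_left
    intro j _
    rw [List.getD_eq_getElem?_getD]
  | cons q pairs ih =>
    intro T hb
    set r : Nat := f q.1 with hrdef
    have hrm : r < T.length := hb q (by simp)
    set T' : List (List String) := T.set r (T.getD r [] ++ [q.2]) with hT'
    have hlen : T'.length = T.length := by simp [hT']
    rw [List.foldl_cons, ← hrdef, ← hT',
      ih T' (fun x hx => by rw [hlen]; exact hb x (by simp [hx])), hlen]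
    apply List.map_congr_left
    intro j hj
    have hjm : j < T.length := List.mem_range.mp hj
    rw [List.filter_cons, ← hrdef]
    by_cases h : r = j
    · subst h
      have hgetD : T'.getD r [] = T.getD r [] ++ [q.2] := by
        rw [List.getD_eq_getElem?_getD, hT']
        rw [List.getElem?_set_self (by omega)]
        simp [List.getD_eq_getElem?_getD]
      simp only [beq_self_eq_true, if_true, List.map_cons, hgetD]
      rw [List.append_assoc, List.singleton_append]
    · have hgetD : T'.getD j [] = T.getD j [] := by
        rw [List.getD_eq_getElem?_getD, hT', List.getElem?_set_ne h]
        rw [List.getD_eq_getElem?_getD]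
      have hne : (r == j) = false := by simp [h]
      simp only [hne, hgetD]
      simp

-- filtering an enumeration by an index window is a slice
theorem filt_enum_window (xs : List String) :
    ∀ (c a b : Nat),
      ((PySem.List.enumerate xs (c : Int)).filter
        (fun q => decide (((a : Nat) : Int) ≤ q.1 ∧ q.1 < ((b : Nat) : Int)))).map (·.2) =
      (xs.drop (a - c)).take (b - max a c) := by
  induction xs with
  | nil =>
    intro c a b
    simp [PySem.List.enumerate_nil]
  | cons x xs ih =>
    intro c a b
    rw [PySem.List.enumerate_cons, List.filter_cons]
    have hcast : (c : Int) + 1 = ((c + 1 : Nat) : Int) := by push_cast; ring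
    rw [hcast]
    by_cases h1 : a ≤ c
    · by_cases h2 : c < b
      · have hd : decide (((a : Nat) : Int) ≤ (c : Int) ∧ (c : Int) < ((b : Nat) : Int)) = true := by
          simp; omega
        rw [hd, if_pos rfl, List.map_cons, ih (c + 1) a b]
        rw [show a - c = 0 by omega, show a - (c + 1) = 0 by omega,
          show max a c = c by omega, show max a (c + 1) = c + 1 by omega,
          List.drop_zero, List.drop_zero, show b - c = (b - (c + 1)) + 1 by omega,
          List.take_succ_cons]
      · have hd : decide (((a : Nat) : Int) ≤ (c : Int) ∧ (c : Int) < ((b : Nat) : Int)) = false := by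
          simp; omega
        rw [hd, if_neg (by simp), ih (c + 1) a b]
        rw [show b - max a c = 0 by omega, show b - max a (c + 1) = 0 by omega]
        simp
    · have hd : decide (((a : Nat) : Int) ≤ (c : Int) ∧ (c : Int) < ((b : Nat) : Int)) = false := by
        simp; omega
      rw [hd, if_neg (by simp), ih (c + 1) a b]
      rw [show a - c = (a - (c + 1)) + 1 by omega, List.drop_succ_cons,
        show max a c = a by omega, show max a (c + 1) = a by omega]

-- re-basing an enumeration under an index-filter: only the predicate's values on the indices matter
theorem filt_enum_reindex (P Q : Int → Bool) :
    ∀ (L : List String) (c d : Int),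
      (∀ k : Nat, k < L.length → P (c + k) = Q (d + k)) →
      ((PySem.List.enumerate L c).filter (fun q => P q.1)).map (·.2) =
        ((PySem.List.enumerate L d).filter (fun q => Q q.1)).map (·.2) := by
  intro L
  induction L with
  | nil => intro c d _; simp [PySem.List.enumerate_nil]
  | cons x L ih =>
    intro c d h
    rw [PySem.List.enumerate_cons, PySem.List.enumerate_cons, List.filter_cons, List.filter_cons]
    have h0 : P c = Q d := by
      have := h 0 (by simp)
      simpa using this
    have hrec := ih (c + 1) (d + 1) (fun k hk => by
      have h2 := h (k + 1) (by simp; omega)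
      have e1 : c + 1 + (k : Int) = c + ((k + 1 : Nat) : Int) := by push_cast; ring
      have e2 : d + 1 + (k : Int) = d + ((k + 1 : Nat) : Int) := by push_cast; ring
      rw [e1, e2]
      exact h2)
    rw [h0]
    by_cases hq : Q d = true
    · rw [if_pos hq, if_pos hq, List.map_cons, List.map_cons, hrec]
    · rw [if_neg hq, if_neg hq, hrec]

theorem div_window (k kN j : Nat) (h : 0 < kN) : k / kN = j ↔ j * kN ≤ k ∧ k < (j + 1) * kN := by
  have h2 := Nat.div_add_mod k kN
  have h3 := Nat.mod_lt k h
  have e3 : (j + 1) * kN = j * kN + kN := by ring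
  constructor
  · rintro rfl
    have e1 : k / kN * kN = kN * (k / kN) := Nat.mul_comm _ _
    have e2 : (k / kN + 1) * kN = kN * (k / kN) + kN := by ring
    omega
  · rintro ⟨ha, hb⟩
    exact Nat.div_eq_of_lt_le (by omega) (by rw [Nat.succ_mul]; omega)

-- ===== VERDICT (by name: the statement is the Claim_ definition above) =====
theorem make_teams_spec : Claim_equal_make_teams := by
  intro p ts _
  unfold Spec_make_teams
  simp only [make_teams, make_teams_alt]
  by_cases h : ts ≤ 0 ∨ ts ≥ (p.length : Int)
  · rw [if_pos h, if_pos h]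
  · rw [if_neg h, if_neg h]
    push Not at h
    obtain ⟨h1, h2⟩ := h
    have hts : 1 ≤ ts := by omega
    set kN : Nat := ts.toNat with hkN
    have hkNpos : 0 < kN := by omega
    have htsk : ts = (kN : Int) := by omega
    set q0 : Nat := p.length / kN with hq0
    have hq0pos : 0 < q0 := (Nat.one_le_div_iff (by omega)).mpr (by omega)
    have hcutle : q0 * kN ≤ p.length := Nat.div_mul_le_self _ _
    have hq0le : q0 ≤ p.length := Nat.div_le_self _ _
    have hk : PySem.Int.floordiv (p.length : Int) ts = (q0 : Int) := by
      rw [htsk, PySem.Int.floordiv_natCast, hq0]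
    -- A side → canonical form
    rw [loop_spec p ts (p.length : Int) hts q0 (p.length + 1) 0 []
        le_rfl (by simp [hq0, hkN]) (by omega)]
    simp only [List.nil_append, zero_add]
    have hcutInt : ts * (q0 : Int) = ((q0 * kN : Nat) : Int) := by push_cast; rw [htsk]; ring
    rw [hcutInt, PySem.List.slice_from_natCast]
    set left : List String := p.drop (q0 * kN) with hleft
    set T : List (List String) :=
      (List.range q0).map (fun i : Nat =>
        PySem.List.slice p (some ((i : Int) * ts)) (some (((i : Int) + 1) * ts))) with hT
    have hTlen : T.length = q0 := by simp [hT]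
    rw [dist_spec left 0 T (by omega) le_rfl, hTlen]
    -- B side → canonical form via fold_assign
    rw [hk]
    have hcutInt' : (q0 : Int) * ts = ((q0 * kN : Nat) : Int) := by push_cast; rw [htsk]
    set F : Int → Nat := fun i =>
      (if i < ((q0 * kN : Nat) : Int) then PySem.Int.floordiv i ts
       else PySem.Int.mod (i - ((q0 * kN : Nat) : Int)) (q0 : Int)).toNat with hF
    have hroute : routeStep ((q0 : Int) * ts) ts (q0 : Int) =
        (fun ts' (q : Int × String) => ts'.set (F q.1) (ts'.getD (F q.1) [] ++ [q.2])) := by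
      funext ts' q
      simp only [routeStep, hF, hcutInt']
    have hbound : ∀ q ∈ PySem.List.enumerate p 0,
        F q.1 < (List.replicate (q0 : Int).toNat ([] : List String)).length := by
      intro q hq
      obtain ⟨k, hk', rfl⟩ := (PySem.List.mem_enumerate_iff _ _ _).mp hq
      simp only [List.length_replicate, Int.toNat_natCast, zero_add, hF]
      by_cases hlt : (k : Int) < ((q0 * kN : Nat) : Int)
      · rw [if_pos hlt, htsk, PySem.Int.floordiv_natCast]
        have hkc : k < q0 * kN := by exact_mod_cast hlt
        have : k / kN < q0 := Nat.div_lt_of_lt_mul (by rw [Nat.mul_comm]; omega)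
        omega
      · rw [if_neg hlt]
        have hnn : 0 ≤ PySem.Int.mod ((k : Int) - ((q0 * kN : Nat) : Int)) (q0 : Int) :=
          PySem.Int.mod_nonneg _ (by exact_mod_cast hq0pos)
        have hlt' : PySem.Int.mod ((k : Int) - ((q0 * kN : Nat) : Int)) (q0 : Int) < (q0 : Int) :=
          PySem.Int.mod_lt _ (by exact_mod_cast hq0pos)
        omega
    rw [hroute, fold_assign F (PySem.List.enumerate p 0)
        (List.replicate (q0 : Int).toNat []) hbound, List.length_replicate, Int.toNat_natCast]
    -- compare the two canonical forms bucket by bucket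
    apply List.map_congr_left
    intro j hj
    have hjm : j < q0 := List.mem_range.mp hj
    have hTgetD : T.getD j [] =
        PySem.List.slice p (some ((j : Int) * ts)) (some (((j : Int) + 1) * ts)) := by
      rw [hT]; exact getD_map_range' _ q0 j hjm
    have hRgetD : (List.replicate q0 ([] : List String)).getD j [] = [] := by
      rw [List.getD_eq_getElem?_getD, List.getElem?_replicate]
      simp [hjm]
    rw [hTgetD, hRgetD, List.nil_append]
    -- split the enumeration of p at the cut
    have hsplit : p = p.take (q0 * kN) ++ p.drop (q0 * kN) := (List.take_append_drop _ _).symm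
    have hbaselen : (p.take (q0 * kN)).length = q0 * kN := by
      rw [List.length_take]; omega
    have hsplitenum : ((PySem.List.enumerate p 0).filter (fun q => F q.1 == j)).map (·.2) =
        ((PySem.List.enumerate (p.take (q0 * kN)) 0).filter (fun q => F q.1 == j)).map (·.2) ++
        ((PySem.List.enumerate (p.drop (q0 * kN)) (0 + ((q0 * kN : Nat) : Int))).filter
          (fun q => F q.1 == j)).map (·.2) := by
      conv_lhs => rw [hsplit]
      rw [PySem.List.enumerate_append, hbaselen, List.filter_append, List.map_append]
    -- base part: the window j*k ≤ i < (j+1)*k is exactly the j-th chunk of p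
    have hja : ((j : Int)) * ts = ((j * kN : Nat) : Int) := by push_cast; rw [htsk]
    have hjb : ((j : Int) + 1) * ts = (((j + 1) * kN : Nat) : Int) := by push_cast; rw [htsk]
    have hbase : ((PySem.List.enumerate (p.take (q0 * kN)) 0).filter
        (fun q => F q.1 == j)).map (·.2) =
        PySem.List.slice p (some ((j : Int) * ts)) (some (((j : Int) + 1) * ts)) := by
      have hcong : (PySem.List.enumerate (p.take (q0 * kN)) 0).filter (fun q => F q.1 == j) =
          (PySem.List.enumerate (p.take (q0 * kN)) 0).filter
            (fun q => decide (((j * kN : Nat) : Int) ≤ q.1 ∧ q.1 < (((j + 1) * kN : Nat) : Int))) := by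
        apply List.filter_congr
        intro q hq
        obtain ⟨k, hk', rfl⟩ := (PySem.List.mem_enumerate_iff _ _ _).mp hq
        rw [hbaselen] at hk'
        simp only [zero_add, hF]
        rw [if_pos (by exact_mod_cast hk'), htsk, PySem.Int.floordiv_natCast, Int.toNat_natCast]
        rw [Bool.eq_iff_iff, beq_iff_eq, decide_eq_true_eq, div_window k kN j hkNpos]
        constructor
        · rintro ⟨ha, hb⟩; exact ⟨by exact_mod_cast ha, by exact_mod_cast hb⟩
        · rintro ⟨ha, hb⟩; exact ⟨by exact_mod_cast ha, by exact_mod_cast hb⟩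
      rw [hcong, show ((0 : Int)) = ((0 : Nat) : Int) by norm_num,
        filt_enum_window (p.take (q0 * kN)) 0 (j * kN) ((j + 1) * kN)]
      simp only [Nat.sub_zero, Nat.max_zero]
      rw [hja, hjb, PySem.List.slice_natCast]
      have hchunk : (j + 1) * kN ≤ q0 * kN := Nat.mul_le_mul_right _ (by omega)
      rw [List.drop_take, List.take_take]
      congr 1
      have e3 : (j + 1) * kN = j * kN + kN := by ring
      omega
    -- leftover part: shift the enumeration base from cut to 0
    have hleftpart : ((PySem.List.enumerate (p.drop (q0 * kN)) (0 + ((q0 * kN : Nat) : Int))).filter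
        (fun q => F q.1 == j)).map (·.2) =
        ((PySem.List.enumerate left 0).filter
          (fun jp => jp.1 % ((q0 : Nat) : Int) == (j : Int))).map (·.2) := by
      refine filt_enum_reindex (fun i => F i == j) (fun i => i % ((q0 : Nat) : Int) == (j : Int))
        left (0 + ((q0 * kN : Nat) : Int)) 0 ?_
      intro k hk'
      have hge : ¬ (0 + ((q0 * kN : Nat) : Int) + (k : Nat) < ((q0 * kN : Nat) : Int)) := by
        push_cast; omega
      simp only [hF, if_neg hge]
      have e1 : 0 + ((q0 * kN : Nat) : Int) + (k : Nat) - ((q0 * kN : Nat) : Int) = ((k : Nat) : Int) := by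
        ring
      rw [e1, PySem.Int.mod_natCast, Int.toNat_natCast]
      have e2 : (0 : Int) + (k : Nat) = ((k : Nat) : Int) := by ring
      rw [e2, ← Int.natCast_mod, Bool.eq_iff_iff, beq_iff_eq, beq_iff_eq]
      exact ⟨fun hh => by exact_mod_cast hh, fun hh => by exact_mod_cast hh⟩
    rw [hsplitenum, hbase, hleftpart]
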